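-- pv_equiv track=rewrite | github.com/sophgo/tpu-mlir | python/test/test_tpulang.py | is_fp
-- ===== SOURCE A (Python) =====
-- def is_fp(dtype, width = None):
--     if width == None:
--         if is_fp(dtype, 8) or is_fp(dtype, 16) or is_fp(dtype, 32) or is_fp(dtype, 64):
--             return True
--     if width == 64 or width == 32 or width == 20:
--         if dtype == 'float'+str(width):
--             return True
--     if width == 8 and dtype in ['float8e5m2', 'float8e5m2fnuz', 'float8e4m3fn', 'float8e4m3fnuz']:
--         return True
--     if width == 16 and dtype in ['float16', 'bfloat16']:
--         return True
--     return False
-- ===== SOURCE B (Python) =====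
-- def _fp_width(dtype):
--     """Parse dtype and return the float width it encodes, or None if it is not
--     a float type. (float20 is a width-20 type, matched only under width=20.)"""
--     if dtype == 'bfloat16':
--         return 16
--     if not dtype.startswith('float'):
--         return None
--     rest = dtype[5:]
--     i = 0
--     while i < len(rest) and rest[i].isdigit():
--         i += 1
--     num, suffix = rest[:i], rest[i:]
--     if num == '8':
--         return 8 if suffix in ('e5m2', 'e5m2fnuz', 'e4m3fn', 'e4m3fnuz') else None
--     if suffix == '' and num in ('16', '20', '32', '64'):
--         return int(num)
--     return None
--
-- def is_fp(dtype, width=None):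
--     w = _fp_width(dtype)
--     if w is None:
--         return False
--     if width is None:
--         return w != 20
--     return width == w
-- ===== Notes on version B (the rewrite author's own statement) =====
-- stated objective: alternative
-- what changed: Inverted the direction of the check: instead of A's self-recursion plus per-width membership tests of dtype against candidate names, B parses dtype once ('bfloat16' special case, 'float' prefix, leading digit run, suffix) into the single width it encodes and then compares that width with the argument (width=None accepts every parsed width except 20, as in A).
import Mathlib
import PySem

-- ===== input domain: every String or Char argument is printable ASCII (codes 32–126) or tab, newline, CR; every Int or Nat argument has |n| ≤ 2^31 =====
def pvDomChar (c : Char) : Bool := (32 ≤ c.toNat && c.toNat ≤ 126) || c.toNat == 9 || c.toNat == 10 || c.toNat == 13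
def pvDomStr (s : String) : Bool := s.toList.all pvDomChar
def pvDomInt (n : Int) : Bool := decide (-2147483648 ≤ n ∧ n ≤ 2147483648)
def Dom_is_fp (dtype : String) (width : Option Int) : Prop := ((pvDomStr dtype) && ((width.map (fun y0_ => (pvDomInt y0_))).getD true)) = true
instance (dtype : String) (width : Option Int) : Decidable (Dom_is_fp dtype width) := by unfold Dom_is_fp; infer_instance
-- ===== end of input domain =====

-- B inverts the direction of the test: instead of A's self-recursion plus per-width
-- membership checks, it PARSES dtype once into the width it encodes ('bfloat16' special
-- case, then 'float' prefix + digit run + suffix) and compares that width with the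
-- argument (objective: alternative; width=None accepts every parsed width except 20, as in A).

-- ===== PORT A =====
-- literal transliteration of A: recursion on width = None, then the branch cascade
def is_fp (dtype : String) (width : Option Int) : Bool :=
  match width with
  | none =>
      -- 'if is_fp(dtype,8) or …: return True'; the later width==… tests are all false for None
      if is_fp dtype (some 8) || is_fp dtype (some 16) || is_fp dtype (some 32) || is_fp dtype (some 64) then true
      else false
  | some w =>
      -- str(width) ported via PySem.Int.toChars (exact for Python's str(int))
      if (w == 64 || w == 32 || w == 20) && (dtype == String.ofList ("float".toList ++ PySem.Int.toChars w)) then true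
      else if w == 8 && (["float8e5m2", "float8e5m2fnuz", "float8e4m3fn", "float8e4m3fnuz"].contains dtype) then true
      else if w == 16 && (["float16", "bfloat16"].contains dtype) then true
      else false
termination_by (match width with | none => 1 | some _ => 0)
decreasing_by all_goals simp

-- ===== PORT B =====
-- the 'while i < len(rest) and rest[i].isdigit()' loop of _fp_width: length of the leading digit run
def digitRun : List Char → Nat
  | [] => 0
  | c :: cs => if PySem.Chars.isdigit c then digitRun cs + 1 else 0

-- _fp_width: parse dtype, return the width it encodes (startswith('float') ported as a
-- take-5 comparison, exact; int(num) ported as PySem.Int.ofStr?, which never returns none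
-- on the digit literals reaching it)
def fpWidth? (dtype : String) : Option Int :=
  if dtype == "bfloat16" then some 16
  else if !(dtype.toList.take 5 == "float".toList) then none
  else
    let rest := dtype.toList.drop 5            -- dtype[5:]
    let i := digitRun rest
    let num := String.ofList (rest.take i)         -- rest[:i]
    let suffix := String.ofList (rest.drop i)      -- rest[i:]
    if num == "8" then
      if ["e5m2", "e5m2fnuz", "e4m3fn", "e4m3fnuz"].contains suffix then some 8 else none
    else if suffix == "" && ["16", "20", "32", "64"].contains num then
      PySem.Int.ofStr? num
    else none

def is_fp_alt (dtype : String) (width : Option Int) : Bool :=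
  match fpWidth? dtype with
  | none => false
  | some w =>
    match width with
    | none => w != 20
    | some x => x == w

-- ===== PRECONDITION & SPEC =====
def Spec_is_fp (dtype : String) (width : Option Int) (out : Bool) : Prop := out = is_fp_alt dtype width
instance (dtype : String) (width : Option Int) (out : Bool) : Decidable (Spec_is_fp dtype width out) := by unfold Spec_is_fp; infer_instance

-- ===== CLAIM =====
def Claim_equal_is_fp : Prop := ∀ (dtype : String) (width : Option Int), Dom_is_fp dtype width → Spec_is_fp dtype width (is_fp dtype width)

-- ===== LEMMAS AND PROOFS =====

-- closed-form characterisation of the parser: the table of all recognised names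
def fpTable (d : String) : Option Int :=
  if d ∈ ["float8e5m2", "float8e5m2fnuz", "float8e4m3fn", "float8e4m3fnuz"] then some 8
  else if d ∈ ["float16", "bfloat16"] then some 16
  else if d = "float20" then some 20
  else if d = "float32" then some 32
  else if d = "float64" then some 64
  else none

lemma fpTable_cases (d : String) :
    fpTable d = none ∨ fpTable d = some 8 ∨ fpTable d = some 16 ∨
    fpTable d = some 20 ∨ fpTable d = some 32 ∨ fpTable d = some 64 := by
  unfold fpTable; split_ifs <;> simp

lemma fpWidth_eq_table (d : String) : fpWidth? d = fpTable d := by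
  by_cases e1 : d = "float8e5m2"; · subst e1; decide
  by_cases e2 : d = "float8e5m2fnuz"; · subst e2; decide
  by_cases e3 : d = "float8e4m3fn"; · subst e3; decide
  by_cases e4 : d = "float8e4m3fnuz"; · subst e4; decide
  by_cases e5 : d = "float16"; · subst e5; decide
  by_cases e6 : d = "bfloat16"; · subst e6; decide
  by_cases e7 : d = "float20"; · subst e7; decide
  by_cases e8 : d = "float32"; · subst e8; decide
  by_cases e9 : d = "float64"; · subst e9; decide
  have ht : fpTable d = none := by
    unfold fpTable; simp [e1, e2, e3, e4, e5, e6, e7, e8, e9]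
  rw [ht]
  unfold fpWidth?
  rw [if_neg (by simp [e6])]
  by_cases hp : d.toList.take 5 = "float".toList
  · rw [if_neg (by simpa using hp)]
    dsimp only
    split_ifs with h1 h2 h3
    · -- num == "8" and suffix recognised: d would be one of the float8 names
      exfalso
      have hnum : (d.toList.drop 5).take (digitRun (d.toList.drop 5)) = ['8'] := by
        have h1' := congrArg String.toList (beq_iff_eq.mp h1)
        rw [String.toList_ofList] at h1'
        exact h1'.trans (by decide)
      have hd : d.toList = "float".toList ++ ((d.toList.drop 5).take (digitRun (d.toList.drop 5))
          ++ (d.toList.drop 5).drop (digitRun (d.toList.drop 5))) := by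
        rw [List.take_append_drop, ← hp, List.take_append_drop]
      have hsuf := h2
      simp only [List.contains_eq_mem, List.mem_cons, List.not_mem_nil, or_false,
        decide_eq_true_eq] at hsuf
      rcases hsuf with hs | hs | hs | hs <;>
        (have hs' := congrArg String.toList hs; rw [String.toList_ofList] at hs') <;>
        [exact e1 (String.toList_inj.mp (by rw [hd, hnum, hs']; decide));
         exact e2 (String.toList_inj.mp (by rw [hd, hnum, hs']; decide));
         exact e3 (String.toList_inj.mp (by rw [hd, hnum, hs']; decide));
         exact e4 (String.toList_inj.mp (by rw [hd, hnum, hs']; decide))]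
    · rfl
    · -- suffix == "" and num recognised: d would be float16/20/32/64
      exfalso
      rw [Bool.and_eq_true] at h3
      obtain ⟨hs0, hnum⟩ := h3
      have hsuf : (d.toList.drop 5).drop (digitRun (d.toList.drop 5)) = [] := by
        have h' := congrArg String.toList (beq_iff_eq.mp hs0)
        rw [String.toList_ofList] at h'
        exact h'.trans (by decide)
      have hd : d.toList = "float".toList ++ ((d.toList.drop 5).take (digitRun (d.toList.drop 5))
          ++ (d.toList.drop 5).drop (digitRun (d.toList.drop 5))) := by
        rw [List.take_append_drop, ← hp, List.take_append_drop]
      simp only [List.contains_eq_mem, List.mem_cons, List.not_mem_nil, or_false,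
        decide_eq_true_eq] at hnum
      rcases hnum with hs | hs | hs | hs <;>
        (have hs' := congrArg String.toList hs; rw [String.toList_ofList] at hs') <;>
        [exact e5 (String.toList_inj.mp (by rw [hd, hs', hsuf]; decide));
         exact e7 (String.toList_inj.mp (by rw [hd, hs', hsuf]; decide));
         exact e8 (String.toList_inj.mp (by rw [hd, hs', hsuf]; decide));
         exact e9 (String.toList_inj.mp (by rw [hd, hs', hsuf]; decide))]
    · rfl
  · rw [if_pos (by simpa using hp)]

lemma dCases (d : String) :
    d = "float8e5m2" ∨ d = "float8e5m2fnuz" ∨ d = "float8e4m3fn" ∨ d = "float8e4m3fnuz" ∨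
    d = "float16" ∨ d = "bfloat16" ∨ d = "float20" ∨ d = "float32" ∨ d = "float64" ∨
    fpTable d = none := by
  unfold fpTable; split_ifs with h1 h2 h3 h4 h5 <;> simp_all <;> tauto

lemma fpTable_none_elim (d : String) (h : fpTable d = none) :
    d ∉ (["float8e5m2", "float8e5m2fnuz", "float8e4m3fn", "float8e4m3fnuz"] : List String) ∧
    d ∉ (["float16", "bfloat16"] : List String) ∧
    d ≠ "float20" ∧ d ≠ "float32" ∧ d ≠ "float64" := by
  unfold fpTable at h; split_ifs at h with h1 h2 h3 h4 h5; exact ⟨h1, h2, h3, h4, h5⟩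

lemma is_fp_some_eq_table (d : String) (w : Int) :
    is_fp d (some w) = (fpTable d == some w) := by
  by_cases hw : w = 8 ∨ w = 16 ∨ w = 20 ∨ w = 32 ∨ w = 64
  · rcases dCases d with h | h | h | h | h | h | h | h | h | h0
    all_goals try (subst h; rcases hw with hw' | hw' | hw' | hw' | hw' <;> subst hw' <;> simp [is_fp, fpTable] <;> decide)
    · obtain ⟨n1, n2, n3, n4, n5⟩ := fpTable_none_elim d h0
      rw [h0]
      have t20 : PySem.Int.toChars 20 = ['2', '0'] := by decide
      have t32 : PySem.Int.toChars 32 = ['3', '2'] := by decide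
      have t64 : PySem.Int.toChars 64 = ['6', '4'] := by decide
      rcases hw with h | h | h | h | h <;> subst h <;> simp_all [is_fp, t20, t32, t64]
  · simp only [not_or] at hw
    obtain ⟨h8, h16, h20, h32, h64⟩ := hw
    have g : ∀ k : Int, w ≠ k → ((w == k) = false) := by intro k hk; simp [hk]
    simp only [is_fp, g 64 h64, g 32 h32, g 20 h20, g 8 h8, g 16 h16]
    rcases fpTable_cases d with h | h | h | h | h | h <;> rw [h] <;> simp [Ne.symm h8,
      Ne.symm h16, Ne.symm h20, Ne.symm h32, Ne.symm h64]

-- ===== VERDICT =====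
theorem is_fp_spec : Claim_equal_is_fp := by
  intro d width _
  unfold Spec_is_fp
  match width with
  | some w =>
      rw [is_fp_some_eq_table]
      simp only [is_fp_alt, fpWidth_eq_table]
      rcases fpTable_cases d with h | h | h | h | h | h <;> rw [h] <;> simp [eq_comm]
  | none =>
      have e : ∀ k : Int, is_fp d (some k) = (fpTable d == some k) := is_fp_some_eq_table d
      simp only [is_fp, e, is_fp_alt, fpWidth_eq_table]
      rcases fpTable_cases d with h | h | h | h | h | h <;> rw [h] <;> simp
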